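-- pv_equiv track=rewrite | github.com/JakubBalcer/Studia-zadania | Python/Series.py | get_first_n_len_str
-- ===== SOURCE A (Python) =====
-- def get_first_n_len_str(n: int) -> str:
--     result = ''
--     for x in range(1, 5):
--         if space_left(result, n) >= (x * str(x)).__len__():
--             result += x * str(x)
--         else:
--             result += str(x) * space_left(result, n)
--     return result
--
-- def space_left(word: str, n: int) -> int: return n-word.__len__()
-- ===== SOURCE B (Python) =====
-- def get_first_n_len_str(n: int) -> str:
--     return "1223334444"[:n] if n >= 0 else ""
-- ===== Notes on version B (the rewrite author's own statement) =====
-- stated objective: simpler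
-- what changed: Replaces the loop over digits 1..4 with the precomputed constant "1223334444" truncated by a single slice (empty for negative n).
import Mathlib
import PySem

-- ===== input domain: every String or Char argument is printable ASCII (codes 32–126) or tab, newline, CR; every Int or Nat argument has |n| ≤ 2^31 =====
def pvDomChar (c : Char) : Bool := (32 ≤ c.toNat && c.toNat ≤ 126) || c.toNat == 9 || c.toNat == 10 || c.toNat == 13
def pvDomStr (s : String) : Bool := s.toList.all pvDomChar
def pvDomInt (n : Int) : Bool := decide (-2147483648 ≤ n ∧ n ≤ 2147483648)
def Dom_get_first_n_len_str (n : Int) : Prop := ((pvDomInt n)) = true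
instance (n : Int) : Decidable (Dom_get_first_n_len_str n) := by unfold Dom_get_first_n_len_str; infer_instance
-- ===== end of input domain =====

-- ===== PORT A =====
-- B changes: the digit loop is replaced by slicing one precomputed constant (objective: simpler).
-- helper space_left(word, n) from the Python module, on the character list of the string
def pvSpaceLeft (word : List Char) (n : Int) : Int := n - word.length

-- literal port of A: fold over range(1, 5), growing the result string
def get_first_n_len_str (n : Int) : String :=
  String.ofList <|
    (PySem.List.pyRange 1 5 1).foldl
      (fun result x =>
        let piece := PySem.List.pyRepeat (PySem.Int.toStr x).toList x
        if (piece.length : Int) ≤ pvSpaceLeft result n then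
          result ++ piece
        else
          result ++ PySem.List.pyRepeat (PySem.Int.toStr x).toList (pvSpaceLeft result n))
      []

-- ===== PORT B =====
def get_first_n_len_str_alt (n : Int) : String :=
  if 0 ≤ n then String.ofList (PySem.List.slice "1223334444".toList none (some n)) else ""

-- ===== PRECONDITION & SPEC =====
def Spec_get_first_n_len_str (n : Int) (out : String) : Prop := out = get_first_n_len_str_alt n
instance (n : Int) (out : String) : Decidable (Spec_get_first_n_len_str n out) := by unfold Spec_get_first_n_len_str; infer_instance

-- ===== CLAIM (what is proved, stated in full; the proofs are below) =====
def Claim_equal_get_first_n_len_str : Prop := ∀ (n : Int), Dom_get_first_n_len_str n → Spec_get_first_n_len_str n (get_first_n_len_str n)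

-- ===== LEMMAS AND PROOFS =====
theorem ports_agree (n : Int) : get_first_n_len_str n = get_first_n_len_str_alt n := by
  have hr : PySem.List.pyRange 1 5 1 = [1, 2, 3, 4] := by decide
  have h1 : (PySem.Int.toStr 1).toList = ['1'] := by decide
  have h2 : (PySem.Int.toStr 2).toList = ['2'] := by decide
  have h3 : (PySem.Int.toStr 3).toList = ['3'] := by decide
  have h4 : (PySem.Int.toStr 4).toList = ['4'] := by decide
  rcases lt_or_ge n 0 with h | h
  · -- n < 0: every iteration appends nothing, and B takes the guard's else branch
    simp only [get_first_n_len_str, get_first_n_len_str_alt, hr, List.foldl, h1, h2, h3, h4,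
      pvSpaceLeft, PySem.List.pyRepeat_singleton]
    simp [show ¬(1:Int) ≤ n by omega, show ¬(2:Int) ≤ n by omega, show ¬(3:Int) ≤ n by omega,
      show ¬(4:Int) ≤ n by omega, show ¬(0:Int) ≤ n by omega, Int.toNat_of_nonpos h.le]
  · rcases lt_or_ge n 10 with h10 | h10
    · -- 0 ≤ n < 10: finitely many inputs, evaluate both ports
      interval_cases n <;> decide
    · -- 10 ≤ n: every loop condition holds and the slice keeps the whole constant
      have h0 : (0:Int) ≤ n := by omega
      have hsl : PySem.List.slice "1223334444".toList none (some n) = "1223334444".toList := by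
        rw [PySem.List.slice_to "1223334444".toList h0]
        have hl : ("1223334444".toList).length = 10 := by decide
        exact List.take_of_length_le (by rw [hl]; omega)
      simp only [get_first_n_len_str, get_first_n_len_str_alt, hr, List.foldl, h1, h2, h3, h4,
        pvSpaceLeft, PySem.List.pyRepeat_singleton, hsl]
      simp [show (1:Int) ≤ n by omega, show (0:Int) ≤ n by omega, List.replicate]
      simp [show (2:Int) < n by omega, show (3:Int) ≤ n - 3 by omega, show (4:Int) ≤ n - 6 by omega]

-- ===== VERDICT (by name: the statement is the Claim_ definition above) =====
theorem get_first_n_len_str_spec : Claim_equal_get_first_n_len_str := by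
  intro n _
  exact ports_agree n
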